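-- pv_equiv track=rewrite | github.com/BlvckBytes/readme_helper | commands/command_toc.py | find_headlines
-- ===== SOURCE A (Python) =====
-- def find_headlines(readme_lines: list[str]) -> list[tuple[str, int, int]]:
--   headlines = []
--
--   # [key level]: { [key line]: number_of_occurrences }
--   headline_counter = {}
--
--   for line in map(lambda x: x.strip(), readme_lines):
--
--     # Not a headline
--     if not line.startswith('#'):
--       continue
--
--     # Strip off leading #s and thus count the headline level
--     level = 0
--     while line.startswith('#'):
--       line = line[1:]
--       level += 1
--
--     # Strip any leading whitespace
--     line = line.lstrip()
--
--     # Don't yield the main headline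
--     if level == 1:
--       continue
--
--     # Create a new tracker object for this level
--     if level not in headline_counter:
--       headline_counter[level] = {}
--
--     level_tracker = headline_counter[level]
--
--     # First occurrence of this headline, add with suffix zero (don't append)
--     if line not in level_tracker:
--       level_tracker[line] = 1
--       headlines.append([line, level, 0])
--
--     else:
--
--       # Bump the suffix of the first zero-suffix entry to one if it's still zero
--       for headline in headlines:
--         if headline[0] == line and headline[1] == level and headline[2] == 0:
--           headline[2] = 1
--           break
--
--       level_tracker[line] += 1
--       headlines.append([line, level, level_tracker[line]])
--
--   return headlines
-- ===== SOURCE B (Python) =====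
-- def _parse(raw):
--   s = raw.strip()
--   if not s.startswith('#'):
--     return None
--   level = next((i for i, c in enumerate(s) if c != '#'), len(s))
--   name = s[level:].lstrip()
--   if level == 1:
--     return None
--   return (name, level)
--
--
-- def find_headlines(readme_lines: list[str]) -> list[tuple[str, int, int]]:
--   keys = [k for k in map(_parse, readme_lines) if k is not None]
--
--   # total number of occurrences per (name, level) key
--   total = {}
--   for k in keys:
--     total[k] = total.get(k, 0) + 1
--
--   # unique keys get suffix 0; duplicated keys get a running index 1, 2, 3, ...
--   result = []
--   running = {}
--   for k in keys:
--     if total[k] == 1: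
--       suffix = 0
--     else:
--       running[k] = running.get(k, 0) + 1
--       suffix = running[k]
--     result.append([k[0], k[1], suffix])
--   return result
-- ===== Notes on version B (the rewrite author's own statement) =====
-- stated objective: alternative
-- what changed: A appends each headline with a provisional suffix and retroactively rescans the whole result list to bump the first zero-suffix duplicate; B first parses all headlines into (name, level) keys while tallying total occurrence counts, then emits the final suffixes (0 for unique keys, a running 1-based index for duplicated keys) in a single forward assignment pass with no rescan.
import Mathlib
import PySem

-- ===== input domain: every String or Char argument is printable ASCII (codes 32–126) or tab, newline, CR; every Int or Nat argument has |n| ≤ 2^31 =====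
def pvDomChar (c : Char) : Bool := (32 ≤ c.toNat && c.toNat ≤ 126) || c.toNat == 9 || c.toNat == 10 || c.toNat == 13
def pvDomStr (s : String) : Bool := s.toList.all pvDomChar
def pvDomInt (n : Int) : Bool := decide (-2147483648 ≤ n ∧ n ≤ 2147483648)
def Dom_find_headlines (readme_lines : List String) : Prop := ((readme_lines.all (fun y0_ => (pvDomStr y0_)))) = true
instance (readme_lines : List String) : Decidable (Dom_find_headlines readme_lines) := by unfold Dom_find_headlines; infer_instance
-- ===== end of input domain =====

-- B replaces A's retroactive rescan-and-bump of earlier entries by a precomputed per-(name, level)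
-- occurrence count plus a single assignment pass (objective: alternative decomposition).

-- ===== PORT A =====

-- A: `while line.startswith('#'): line = line[1:]; level += 1`
def pvA_stripLevel (cs : List Char) (level : Int) : List Char × Int :=
  if h : PySem.Chars.startswith cs ['#'] = true then
    pvA_stripLevel (PySem.List.slice cs (some 1) none) (level + 1)
  else (cs, level)
termination_by cs.length
decreasing_by
  rw [PySem.List.slice_from_one]
  rw [PySem.Chars.startswith_iff] at h
  cases cs with
  | nil => simp at h
  | cons a t => simp

-- A: `for headline in headlines: if … and … and …: headline[2] = 1; break`
def pvA_bump (hs : List (String × Int × Int)) (line : String) (level : Int) :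
    List (String × Int × Int) :=
  match hs with
  | [] => []
  | h :: t =>
    if h.1 = line ∧ h.2.1 = level ∧ h.2.2 = 0 then (h.1, h.2.1, 1) :: t
    else h :: pvA_bump t line level

-- A's loop body (headlines, headline_counter are the fold state; `headline_counter[level]`
-- cannot raise KeyError because membership was just ensured, so getD is value-exact there,
-- and `level_tracker[line] += 1` reads a key that `line in level_tracker` just confirmed)
def pvA_step (st : List (String × Int × Int) × PySem.Dict Int (PySem.Dict String Int))
    (raw : String) : List (String × Int × Int) × PySem.Dict Int (PySem.Dict String Int) :=
  let line := PySem.Str.strip raw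
  if PySem.Str.startswith line "#" = false then st
  else
    let p := pvA_stripLevel line.toList 0
    let name := String.ofList (PySem.Chars.lstrip p.1)
    let level := p.2
    if level = 1 then st
    else
      let hc := if st.2.contains level then st.2 else st.2.insert level PySem.Dict.empty
      let lt := hc.getD level PySem.Dict.empty
      if lt.contains name = false then
        (st.1 ++ [(name, level, 0)], hc.insert level (lt.insert name 1))
      else
        let c := lt.getD name 0 + 1
        (pvA_bump st.1 name level ++ [(name, level, c)], hc.insert level (lt.insert name c))

def find_headlines (readme_lines : List String) : List (String × Int × Int) :=
  (readme_lines.foldl pvA_step ([], PySem.Dict.empty)).1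

-- ===== PORT B =====

-- B: parse one raw line into its (name, level) key, or None
def pvB_parse (raw : String) : Option (String × Int) :=
  let s := (PySem.Str.strip raw).toList
  if PySem.Chars.startswith s ['#'] = false then none
  else
    -- `next((i for i, c in enumerate(s) if c != '#'), len(s))`
    let level : Int :=
      (((PySem.List.enumerate s 0).find? (fun p => !(p.2 == '#'))).map Prod.fst).getD
        ((s.length : Nat) : Int)
    let name := String.ofList (PySem.Chars.lstrip (PySem.List.slice s (some level) none))
    if level = 1 then none else some (name, level)

-- B's second-pass loop body (result, running are the fold state)
def pvB_step (total : PySem.Dict (String × Int) Int)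
    (st : List (String × Int × Int) × PySem.Dict (String × Int) Int) (k : String × Int) :
    List (String × Int × Int) × PySem.Dict (String × Int) Int :=
  if total.getD k 0 = 1 then (st.1 ++ [(k.1, k.2, 0)], st.2)
  else
    let r := st.2.insert k (st.2.getD k 0 + 1)
    (st.1 ++ [(k.1, k.2, r.getD k 0)], r)

def find_headlines_alt (readme_lines : List String) : List (String × Int × Int) :=
  let keys := readme_lines.filterMap pvB_parse
  let total := keys.foldl (fun d k => d.insert k (d.getD k 0 + 1)) PySem.Dict.empty
  (keys.foldl (pvB_step total) ([], PySem.Dict.empty)).1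

-- ===== PRECONDITION & SPEC =====
def Spec_find_headlines (readme_lines : List String) (out : List (String × Int × Int)) : Prop := out = find_headlines_alt readme_lines
instance (readme_lines : List String) (out : List (String × Int × Int)) : Decidable (Spec_find_headlines readme_lines out) := by unfold Spec_find_headlines; infer_instance

-- ===== CLAIM (what is proved, stated in full; the proofs are below) =====
def Claim_equal_find_headlines : Prop := ∀ (readme_lines : List String), Dom_find_headlines readme_lines → Spec_find_headlines readme_lines (find_headlines readme_lines)

-- ===== LEMMAS AND PROOFS =====

-- number of leading '#' characters
def pvLead (cs : List Char) : Nat := (cs.takeWhile (· == '#')).length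

-- the common per-line key both parsers compute
def pvKey (cs : List Char) : Option (String × Int) :=
  if pvLead cs = 0 ∨ pvLead cs = 1 then none
  else some (String.ofList (PySem.Chars.lstrip (cs.drop (pvLead cs))), (pvLead cs : Int))

-- canonical final output over the key stream: a unique key gets suffix 0,
-- a duplicated key gets its 1-based occurrence index
def pvH (seen : List (String × Int)) : List (String × Int) → List (String × Int × Int)
  | [] => []
  | k :: ks =>
    (k.1, k.2, if seen.count k = 0 ∧ ks.count k = 0 then 0 else (seen.count k : Int) + 1)
      :: pvH (seen ++ [k]) ks

-- B's second pass, written against a fixed total key list t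
def pvHB (t : List (String × Int)) (seen : List (String × Int)) :
    List (String × Int) → List (String × Int × Int)
  | [] => []
  | k :: ks =>
    (k.1, k.2, if t.count k = 1 then 0 else (seen.count k : Int) + 1) :: pvHB t (seen ++ [k]) ks

-- A's counter invariant: the nested dict stores exactly the positive per-key counts
def pvInvc (ks : List (String × Int)) (hc : PySem.Dict Int (PySem.Dict String Int)) : Prop :=
  ∀ (s : String) (lvl : Int),
    (hc.getD lvl PySem.Dict.empty).get? s =
      if ks.count (s, lvl) = 0 then none else some ((ks.count (s, lvl) : Int))


theorem pvLead_nil : pvLead [] = 0 := rfl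

theorem pvLead_cons (c : Char) (t : List Char) :
    pvLead (c :: t) = if c = '#' then pvLead t + 1 else 0 := by
  by_cases hc : c = '#' <;> simp [pvLead, hc]

theorem pvStartswith_iff_lead (cs : List Char) :
    PySem.Chars.startswith cs ['#'] = true ↔ pvLead cs ≠ 0 := by
  rw [PySem.Chars.startswith_iff]
  cases cs with
  | nil => simp [pvLead_nil]
  | cons c t =>
    rw [List.cons_prefix_cons]
    by_cases hc : c = '#' <;> simp [pvLead_cons, hc, Eq.comm (a := '#')]

theorem pvA_stripLevel_eq (cs : List Char) (l : Int) :
    pvA_stripLevel cs l = (cs.drop (pvLead cs), l + (pvLead cs : Int)) := by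
  induction cs generalizing l with
  | nil =>
    rw [pvA_stripLevel]
    rw [dif_neg (by simp [pvStartswith_iff_lead, pvLead_nil])]
    simp [pvLead_nil]
  | cons c t ih =>
    rw [pvA_stripLevel]
    by_cases hc : c = '#'
    · rw [dif_pos (by rw [pvStartswith_iff_lead, pvLead_cons]; simp [hc])]
      rw [PySem.List.slice_from_one, List.tail_cons, ih]
      rw [pvLead_cons, if_pos hc]
      rw [List.drop_succ_cons]
      refine Prod.ext rfl ?_
      push_cast
      ring
    · rw [dif_neg (by rw [pvStartswith_iff_lead, pvLead_cons, if_neg hc]; simp)]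
      simp [pvLead_cons, hc]

theorem pvFind_enum_eq (t : List Char) (s : Int) :
    ((((PySem.List.enumerate t s).find? (fun p => !(p.2 == '#'))).map Prod.fst).getD
        (s + (t.length : Int))) = s + (pvLead t : Int) := by
  induction t generalizing s with
  | nil => simp [PySem.List.enumerate_nil, pvLead_nil]
  | cons c t ih =>
    rw [PySem.List.enumerate_cons]
    by_cases hc : c = '#'
    · rw [List.find?_cons_of_neg (by simp [hc])]
      rw [pvLead_cons, if_pos hc]
      have h2 := ih (s + 1)
      rw [List.length_cons]
      push_cast at h2 ⊢
      rw [show s + ((t.length : Int) + 1) = s + 1 + (t.length : Int) by ring, h2]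
      ring
    · rw [List.find?_cons_of_pos (by simp [hc])]
      simp [pvLead_cons, hc]

theorem pvB_parse_eq (raw : String) :
    pvB_parse raw = pvKey (PySem.Str.strip raw).toList := by
  simp only [pvB_parse, pvKey, PySem.Str.toList_strip]
  generalize PySem.Chars.strip raw.toList = cs
  by_cases h0 : pvLead cs = 0
  · have hsw : PySem.Chars.startswith cs ['#'] = false := by
      rw [← Bool.not_eq_true, pvStartswith_iff_lead]; omega
    rw [if_pos hsw, if_pos (Or.inl h0)]
  · have hsw : PySem.Chars.startswith cs ['#'] = true := (pvStartswith_iff_lead cs).mpr h0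
    rw [if_neg (by simp [hsw])]
    have hlev := pvFind_enum_eq cs 0
    rw [zero_add, zero_add] at hlev
    rw [hlev, PySem.List.slice_from_natCast]
    by_cases h1 : pvLead cs = 1
    · rw [if_pos (show ((pvLead cs : Int)) = 1 by exact_mod_cast h1), if_pos (Or.inr h1)]
    · rw [if_neg (show ¬((pvLead cs : Int)) = 1 by exact_mod_cast h1),
        if_neg (show ¬(pvLead cs = 0 ∨ pvLead cs = 1) by tauto)]

-- A's loop body after the key has been parsed (proof-side abbreviation of pvA_step's tail)
def pvA_inner (st : List (String × Int × Int) × PySem.Dict Int (PySem.Dict String Int))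
    (k : String × Int) : List (String × Int × Int) × PySem.Dict Int (PySem.Dict String Int) :=
  let hc := if st.2.contains k.2 then st.2 else st.2.insert k.2 PySem.Dict.empty
  let lt := hc.getD k.2 PySem.Dict.empty
  if lt.contains k.1 = false then
    (st.1 ++ [(k.1, k.2, 0)], hc.insert k.2 (lt.insert k.1 1))
  else
    let c := lt.getD k.1 0 + 1
    (pvA_bump st.1 k.1 k.2 ++ [(k.1, k.2, c)], hc.insert k.2 (lt.insert k.1 c))

theorem pvA_step_eq (st : List (String × Int × Int) × PySem.Dict Int (PySem.Dict String Int))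
    (raw : String) :
    pvA_step st raw =
      match pvB_parse raw with
      | none => st
      | some k => pvA_inner st k := by
  rw [pvB_parse_eq]
  have h9 : "#".toList = ['#'] := rfl
  simp only [pvA_step, pvKey, pvA_inner, PySem.Str.startswith_eq, PySem.Str.toList_strip, h9,
    pvA_stripLevel_eq, zero_add]
  generalize PySem.Chars.strip raw.toList = cs
  by_cases h0 : pvLead cs = 0
  · have hsw : PySem.Chars.startswith cs ['#'] = false := by
      rw [← Bool.not_eq_true, pvStartswith_iff_lead]; omega
    rw [if_pos hsw, if_pos (Or.inl h0)]
  · have hsw : PySem.Chars.startswith cs ['#'] = true := (pvStartswith_iff_lead cs).mpr h0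
    rw [if_neg (by simp [hsw])]
    by_cases h1 : pvLead cs = 1
    · rw [if_pos (show ((pvLead cs : Int)) = 1 by exact_mod_cast h1), if_pos (Or.inr h1)]
    · rw [if_neg (show ¬((pvLead cs : Int)) = 1 by exact_mod_cast h1),
        if_neg (show ¬(pvLead cs = 0 ∨ pvLead cs = 1) by tauto)]

theorem pvPairEq {a b : String × Int} (h1 : a.1 = b.1) (h2 : a.2 = b.2) : a = b := by
  cases a; cases b; simp_all

theorem pvA_bump_id (t : List (String × Int)) (seen : List (String × Int)) (k : String × Int)
    (h : seen.count k ≠ 0) : pvA_bump (pvH seen t) k.1 k.2 = pvH seen t := by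
  induction t generalizing seen with
  | nil => rfl
  | cons j t ih =>
    rw [pvH, pvA_bump]
    rw [if_neg ?hno]
    case hno =>
      rintro ⟨e1, e2, e0⟩
      dsimp only at e0
      have hj : j = k := Prod.ext e1 e2
      rw [hj] at e0
      by_cases hz : seen.count k = 0 ∧ t.count k = 0
      · exact h hz.1
      · rw [if_neg hz] at e0; omega
    refine congrArg (List.cons _) (ih (seen ++ [j]) ?_)
    intro e
    rw [List.count_append] at e
    exact h (by omega)

theorem pvH_append (ks : List (String × Int)) (seen : List (String × Int)) (k : String × Int) :
    pvH seen (ks ++ [k]) =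
      if ks.count k = 0 then
        pvH seen ks ++ [(k.1, k.2, if seen.count k = 0 then 0 else (seen.count k : Int) + 1)]
      else
        pvA_bump (pvH seen ks) k.1 k.2 ++
          [(k.1, k.2, ((seen.count k : Int) + (ks.count k : Int)) + 1)] := by
  induction ks generalizing seen with
  | nil =>
    rw [if_pos (by simp)]
    by_cases hs : seen.count k = 0 <;> simp [pvH, hs]
  | cons j t ih =>
    rw [List.cons_append, pvH, ih (seen ++ [j]), pvH]
    by_cases hjk : j = k
    · subst hjk
      have f1 : (t ++ [j]).count j = t.count j + 1 := by simp [List.count_append]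
      have f2 : (seen ++ [j]).count j = seen.count j + 1 := by simp [List.count_append]
      have f3 : (j :: t).count j = t.count j + 1 := by simp [List.count_cons]
      rw [if_neg (show ¬(seen.count j = 0 ∧ (t ++ [j]).count j = 0) by omega)]
      rw [if_neg (show ¬(j :: t).count j = 0 by omega)]
      by_cases hz : seen.count j = 0 ∧ t.count j = 0
      · rw [if_pos hz]
        conv_rhs => rw [pvA_bump]
        rw [if_pos (show (j.1, j.2, (0 : Int)).1 = j.1 ∧ (j.1, j.2, (0 : Int)).2.1 = j.2 ∧
              (j.1, j.2, (0 : Int)).2.2 = 0 from ⟨rfl, rfl, rfl⟩)]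
        rw [if_pos hz.2, if_neg (show ¬(seen ++ [j]).count j = 0 by omega)]
        simp only [List.cons_append, f2, f3, hz.1, hz.2]
        push_cast
        norm_num
      · rw [if_neg hz]
        conv_rhs =>
          rw [pvA_bump,
            if_neg (show ¬((j.1, j.2, (seen.count j : Int) + 1).1 = j.1 ∧
                (j.1, j.2, (seen.count j : Int) + 1).2.1 = j.2 ∧
                (j.1, j.2, (seen.count j : Int) + 1).2.2 = 0) by
              rintro ⟨-, -, e0⟩
              simp only at e0
              omega)]
        by_cases htk : t.count j = 0
        · rw [if_pos htk, if_neg (show ¬(seen ++ [j]).count j = 0 by omega)]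
          rw [pvA_bump_id t (seen ++ [j]) j (by omega)]
          simp only [List.cons_append, f2, f3, htk]
          push_cast
          norm_num
        · rw [if_neg htk]
          simp only [List.cons_append, f2, f3]
          push_cast
          ring_nf
    · have hd1 : (t ++ [k]).count j = t.count j := by
        simp [List.count_append, List.count_cons, List.count_nil, Ne.symm hjk]
      have hd2 : (j :: t).count k = t.count k := by
        simp [List.count_cons, hjk]
      have hd3 : (seen ++ [j]).count k = seen.count k := by
        simp [List.count_append, List.count_cons, List.count_nil, hjk]
      rw [hd1, hd2, hd3]
      by_cases htk : t.count k = 0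
      · rw [if_pos htk, if_pos htk]
        simp
      · rw [if_neg htk, if_neg htk]
        conv_rhs =>
          rw [pvA_bump,
            if_neg (show ¬((j.1, j.2, if seen.count j = 0 ∧ t.count j = 0 then (0 : Int)
                  else (seen.count j : Int) + 1).1 = k.1 ∧
                (j.1, j.2, if seen.count j = 0 ∧ t.count j = 0 then (0 : Int)
                  else (seen.count j : Int) + 1).2.1 = k.2 ∧
                (j.1, j.2, if seen.count j = 0 ∧ t.count j = 0 then (0 : Int)
                  else (seen.count j : Int) + 1).2.2 = 0) by
              rintro ⟨e1, e2, -⟩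
              exact hjk (pvPairEq e1 e2))]
        simp

theorem pvA_inner_lt (hc : PySem.Dict Int (PySem.Dict String Int)) (lvl : Int) :
    (if hc.contains lvl then hc else hc.insert lvl PySem.Dict.empty).getD lvl PySem.Dict.empty
      = hc.getD lvl PySem.Dict.empty := by
  by_cases hct : hc.contains lvl = true
  · rw [if_pos hct]
  · rw [if_neg hct, PySem.Dict.getD_insert_self]
    exact (PySem.Dict.getD_of_not_contains _ _ (by simpa using hct)).symm

theorem pvA_inner_side (hc : PySem.Dict Int (PySem.Dict String Int)) (klvl lvl : Int)
    (hne : lvl ≠ klvl) :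
    (if hc.contains klvl then hc else hc.insert klvl PySem.Dict.empty).getD lvl PySem.Dict.empty
      = hc.getD lvl PySem.Dict.empty := by
  by_cases hct : hc.contains klvl = true
  · rw [if_pos hct]
  · rw [if_neg hct, PySem.Dict.getD_insert, if_neg hne]

theorem pvA_inner_fst (hs : List (String × Int × Int))
    (hc : PySem.Dict Int (PySem.Dict String Int)) (ks : List (String × Int)) (k : String × Int)
    (hinv : pvInvc ks hc) :
    (pvA_inner (hs, hc) k).1 =
      if ks.count k = 0 then hs ++ [(k.1, k.2, 0)]
      else pvA_bump hs k.1 k.2 ++ [(k.1, k.2, (ks.count k : Int) + 1)] := by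
  have hq := hinv k.1 k.2
  have hkk : ((k.1, k.2) : String × Int) = k := rfl
  rw [hkk] at hq
  simp only [pvA_inner, pvA_inner_lt]
  by_cases h0 : ks.count k = 0
  · rw [if_pos h0] at hq
    have hcon : (hc.getD k.2 PySem.Dict.empty).contains k.1 = false := by
      rw [PySem.Dict.contains_eq_isSome_get?, hq]; rfl
    rw [if_pos hcon, if_pos h0]
  · rw [if_neg h0] at hq
    have hcon : (hc.getD k.2 PySem.Dict.empty).contains k.1 = true := by
      rw [PySem.Dict.contains_eq_isSome_get?, hq]; rfl
    have hgd : (hc.getD k.2 PySem.Dict.empty).getD k.1 0 = (ks.count k : Int) := by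
      rw [PySem.Dict.getD_eq_get?_getD, hq]; rfl
    rw [if_neg (by simp [hcon]), if_neg h0, hgd]

theorem pvA_inner_inv (hs : List (String × Int × Int))
    (hc : PySem.Dict Int (PySem.Dict String Int)) (ks : List (String × Int)) (k : String × Int)
    (hinv : pvInvc ks hc) : pvInvc (ks ++ [k]) (pvA_inner (hs, hc) k).2 := by
  have hq := hinv k.1 k.2
  have hkk : ((k.1, k.2) : String × Int) = k := rfl
  rw [hkk] at hq
  simp only [pvA_inner, pvA_inner_lt]
  have main : ∀ v : Int, v = (ks.count k : Int) + 1 →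
      pvInvc (ks ++ [k])
        ((if hc.contains k.2 then hc else hc.insert k.2 PySem.Dict.empty).insert k.2
          ((hc.getD k.2 PySem.Dict.empty).insert k.1 v)) := by
    intro v hv s lvl
    rw [PySem.Dict.getD_insert]
    by_cases hlv : lvl = k.2
    · rw [if_pos hlv, PySem.Dict.get?_insert]
      by_cases hsk : s = k.1
      · rw [if_pos hsk]
        have hsl : ((s, lvl) : String × Int) = k := by rw [hsk, hlv]
        have hcnt : (ks ++ [k]).count (s, lvl) = ks.count k + 1 := by
          rw [hsl]; simp [List.count_append]
        rw [hcnt]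
        rw [if_neg (show ¬(ks.count k + 1 = 0) by omega)]
        rw [hv]
        push_cast
        rfl
      · rw [if_neg hsk]
        have hns : (s, lvl) ≠ k := by
          rw [← hkk]
          exact fun e => hsk (congrArg Prod.fst e)
        have hcnt : (ks ++ [k]).count (s, lvl) = ks.count (s, lvl) := by
          simp [List.count_append, List.count_cons, List.count_nil, Ne.symm hns]
        rw [hcnt, ← hlv]
        exact hinv s lvl
    · rw [if_neg hlv, pvA_inner_side hc k.2 lvl hlv]
      have hns : (s, lvl) ≠ k := by
        rw [← hkk]
        exact fun e => hlv (congrArg Prod.snd e)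
      have hcnt : (ks ++ [k]).count (s, lvl) = ks.count (s, lvl) := by
        simp [List.count_append, List.count_cons, List.count_nil, Ne.symm hns]
      rw [hcnt]
      exact hinv s lvl
  by_cases h0 : ks.count k = 0
  · rw [if_pos h0] at hq
    have hcon : (hc.getD k.2 PySem.Dict.empty).contains k.1 = false := by
      rw [PySem.Dict.contains_eq_isSome_get?, hq]; rfl
    rw [if_pos hcon]
    have := main 1 (by rw [h0]; norm_num)
    simpa using this
  · rw [if_neg h0] at hq
    have hcon : (hc.getD k.2 PySem.Dict.empty).contains k.1 = true := by
      rw [PySem.Dict.contains_eq_isSome_get?, hq]; rfl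
    have hgd : (hc.getD k.2 PySem.Dict.empty).getD k.1 0 = (ks.count k : Int) := by
      rw [PySem.Dict.getD_eq_get?_getD, hq]; rfl
    rw [if_neg (by simp [hcon]), hgd]
    exact main _ rfl

theorem pvA_loop (lines : List String) (ks : List (String × Int))
    (hc : PySem.Dict Int (PySem.Dict String Int)) (hinv : pvInvc ks hc) :
    (lines.foldl pvA_step (pvH [] ks, hc)).1 =
      pvH [] (ks ++ lines.filterMap pvB_parse) := by
  induction lines generalizing ks hc with
  | nil => simp
  | cons raw rest ih =>
    rw [List.foldl_cons, pvA_step_eq]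
    cases hp : pvB_parse raw with
    | none =>
      have hfm : List.filterMap pvB_parse (raw :: rest) = List.filterMap pvB_parse rest := by
        simp [List.filterMap_cons, hp]
      rw [hfm]
      show (List.foldl pvA_step (pvH [] ks, hc) rest).1 = _
      exact ih ks hc hinv
    | some k =>
      have hfm : List.filterMap pvB_parse (raw :: rest) = k :: List.filterMap pvB_parse rest := by
        simp [List.filterMap_cons, hp]
      rw [hfm]
      show (List.foldl pvA_step (pvA_inner (pvH [] ks, hc) k) rest).1 = _
      have h1 := pvA_inner_fst (pvH [] ks) hc ks k hinv
      have h2 := pvA_inner_inv (pvH [] ks) hc ks k hinv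
      have hfst : (pvA_inner (pvH [] ks, hc) k).1 = pvH [] (ks ++ [k]) := by
        rw [h1, pvH_append]
        by_cases h0 : ks.count k = 0
        · rw [if_pos h0, if_pos h0]
          simp
        · rw [if_neg h0, if_neg h0]
          norm_num
      have hpair : pvA_inner (pvH [] ks, hc) k =
          (pvH [] (ks ++ [k]), (pvA_inner (pvH [] ks, hc) k).2) := by
        rw [← hfst]
      rw [hpair, ih (ks ++ [k]) _ h2]
      rw [List.append_assoc, List.singleton_append]

theorem pvB_loop (tot : List (String × Int)) (rest seen : List (String × Int))
    (out : List (String × Int × Int)) (r : PySem.Dict (String × Int) Int)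
    (hr : ∀ k, ((tot.count k : Int) ≠ 1) → r.getD k 0 = (seen.count k : Int)) :
    (rest.foldl (pvB_step (PySem.Dict.counter tot)) (out, r)).1 = out ++ pvHB tot seen rest := by
  induction rest generalizing seen out r with
  | nil => simp [pvHB]
  | cons k t ih =>
    rw [List.foldl_cons]
    by_cases h1 : ((tot.count k : Int)) = 1
    · have hstep : pvB_step (PySem.Dict.counter tot) (out, r) k = (out ++ [(k.1, k.2, 0)], r) := by
        simp [pvB_step, PySem.Dict.getD_counter, h1]
      have hr1 : ∀ k', ((tot.count k' : Int) ≠ 1) → r.getD k' 0 = ((seen ++ [k]).count k' : Int) := by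
        intro k' hk'
        by_cases hkk : k' = k
        · subst hkk; exact absurd h1 hk'
        · rw [hr k' hk']
          simp [List.count_append, List.count_cons, List.count_nil, Ne.symm hkk]
      rw [hstep, ih (seen ++ [k]) (out ++ [(k.1, k.2, 0)]) r hr1, pvHB,
        if_pos (show tot.count k = 1 by exact_mod_cast h1)]
      simp
    · have hstep : pvB_step (PySem.Dict.counter tot) (out, r) k =
          (out ++ [(k.1, k.2, (seen.count k : Int) + 1)], r.insert k (r.getD k 0 + 1)) := by
        simp [pvB_step, PySem.Dict.getD_counter, h1, PySem.Dict.getD_insert_self, hr k h1]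
      have hr2 : ∀ k', ((tot.count k' : Int) ≠ 1) →
          (r.insert k (r.getD k 0 + 1)).getD k' 0 = ((seen ++ [k]).count k' : Int) := by
        intro k' hk'
        rw [PySem.Dict.getD_insert]
        by_cases hkk : k' = k
        · rw [if_pos hkk, hkk, hr k h1]
          simp [List.count_append]
        · rw [if_neg hkk, hr k' hk']
          simp [List.count_append, List.count_cons, List.count_nil, Ne.symm hkk]
      rw [hstep, ih (seen ++ [k]) _ _ hr2, pvHB,
        if_neg (show ¬ tot.count k = 1 by exact_mod_cast h1)]
      simp

theorem pvHB_eq_pvH (rest pre : List (String × Int)) :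
    pvHB (pre ++ rest) pre rest = pvH pre rest := by
  induction rest generalizing pre with
  | nil => simp [pvHB, pvH]
  | cons k t ih =>
    rw [pvHB, pvH]
    have hcnt : (pre ++ k :: t).count k = pre.count k + 1 + t.count k := by
      simp [List.count_append, List.count_cons]
      omega
    have hcond : ((pre ++ k :: t).count k = 1) ↔ (pre.count k = 0 ∧ t.count k = 0) := by
      omega
    have htail : pvHB (pre ++ k :: t) (pre ++ [k]) t = pvH (pre ++ [k]) t := by
      have := ih (pre ++ [k])
      simpa using this
    rw [htail]
    by_cases hpt : pre.count k = 0 ∧ t.count k = 0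
    · rw [if_pos (hcond.mpr hpt), if_pos hpt]
    · rw [if_neg (fun hh => hpt (hcond.mp hh)), if_neg hpt]

-- ===== VERDICT (by name: the statement is the Claim_ definition above) =====
theorem find_headlines_spec : Claim_equal_find_headlines := by
  intro lines _
  unfold Spec_find_headlines find_headlines find_headlines_alt
  show (List.foldl pvA_step ([], PySem.Dict.empty) lines).1 =
    (List.foldl
      (pvB_step (List.foldl (fun d k => d.insert k (d.getD k 0 + 1)) PySem.Dict.empty
        (lines.filterMap pvB_parse)))
      ([], PySem.Dict.empty) (lines.filterMap pvB_parse)).1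
  have hA := pvA_loop lines [] PySem.Dict.empty
    (by intro s lvl; simp [pvInvc, PySem.Dict.getD_empty, PySem.Dict.get?_empty])
  have hB := pvB_loop (lines.filterMap pvB_parse) (lines.filterMap pvB_parse) [] []
    PySem.Dict.empty (by intro k _; simp [PySem.Dict.getD_empty])
  rw [PySem.Dict.foldl_insert_getD_add_one_eq_counter, hB]
  have hnil : pvH [] [] = [] := rfl
  rw [hnil] at hA
  rw [hA]
  simpa using (pvHB_eq_pvH (lines.filterMap pvB_parse) []).symm
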